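-- pv_equiv track=rewrite | github.com/BWSI-RACECAR/code-clash-06-Peter4300 | checkpoints.py | longestdistance
-- ===== SOURCE A (Python) =====
-- def longestdistance(checkpoints):
--     # type checkpoints: list
--     # return type: int
--
--     new_list = []
--     while checkpoints:
--         minimum = checkpoints[0]
--         for x in checkpoints:
--             if x < minimum:
--                 minimum = x
--         new_list.append(minimum)
--         checkpoints.remove(minimum)
--     largest = abs(new_list[1]-new_list[0])
--     for x in range(len(new_list)-1):
--         distance = abs(new_list[x+1]-new_list[x])
--         if distance > largest:
--             largest = distance
--     return largest
-- ===== SOURCE B (Python) =====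
-- def longestdistance(checkpoints):
--     # B: built-in sort + max over a generator of adjacent gaps (A empties the
--     # argument list in place; B leaves it untouched — return value unchanged).
--     new_list = sorted(checkpoints)
--     return max(new_list[i + 1] - new_list[i] for i in range(len(new_list) - 1))
-- ===== Notes on version B (the rewrite author's own statement) =====
-- stated objective: faster
-- what changed: Replaces the destructive quadratic selection sort and the abs/accumulator scan with the built-in sort followed by max over adjacent differences (nonnegative after sorting, so abs disappears).
import Mathlib
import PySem

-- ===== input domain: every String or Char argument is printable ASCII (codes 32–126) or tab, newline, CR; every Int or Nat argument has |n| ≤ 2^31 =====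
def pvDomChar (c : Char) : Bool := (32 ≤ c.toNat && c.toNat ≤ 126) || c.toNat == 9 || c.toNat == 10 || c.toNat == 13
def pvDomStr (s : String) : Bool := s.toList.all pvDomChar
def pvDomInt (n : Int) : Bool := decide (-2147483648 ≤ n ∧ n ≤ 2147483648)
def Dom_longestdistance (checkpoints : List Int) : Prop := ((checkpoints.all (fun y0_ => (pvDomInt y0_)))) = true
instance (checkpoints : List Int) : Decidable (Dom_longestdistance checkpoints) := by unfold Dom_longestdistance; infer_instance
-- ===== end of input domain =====

-- B replaces A's destructive selection sort + abs/accumulator scan by built-in sort + max of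
-- adjacent differences (A empties its argument in place, B does not; return values proved equal).


-- ===== PORT A =====
-- 'minimum = checkpoints[0]; for x in checkpoints: if x < minimum: minimum = x'
def pvInnerMin (c : List Int) (init : Int) : Int :=
  c.foldl (fun minimum x => if x < minimum then x else minimum) init

-- termination helper for the while loop: the computed minimum is an element of the list
theorem pvInnerMin_mem (c : List Int) : ∀ init : Int, pvInnerMin c init = init ∨ pvInnerMin c init ∈ c := by
  induction c with
  | nil => intro init; exact Or.inl rfl
  | cons a t ih =>
    intro init
    simp only [pvInnerMin, List.foldl_cons] at *
    by_cases h : a < init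
    · simp only [if_pos h]
      rcases ih a with h' | h'
      · exact Or.inr (by simp [h'])
      · exact Or.inr (List.mem_cons_of_mem _ h')
    · simp only [if_neg h]
      rcases ih init with h' | h'
      · exact Or.inl h'
      · exact Or.inr (List.mem_cons_of_mem _ h')

-- the while loop: select the minimum, append it, remove it from the list
def pvSelSort (c : List Int) : List Int :=
  match c with
  | [] => []
  | a :: t =>
    let minimum := pvInnerMin (a :: t) a
    minimum :: pvSelSort ((PySem.List.remove? (a :: t) minimum).getD [])
termination_by c.length
decreasing_by
  have hm : pvInnerMin (a :: t) a ∈ a :: t := by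
    rcases pvInnerMin_mem (a :: t) a with h | h
    · rw [h]; exact List.mem_cons_self
    · exact h
  rw [PySem.List.remove?_eq_some_erase _ _ hm]
  have h2 : ((a :: t).erase (pvInnerMin (a :: t) a)).length = t.length := by
    simpa using List.length_erase_of_mem hm
  simp [h2]

def longestdistance (checkpoints : List Int) : Int :=
  let new_list := pvSelSort checkpoints
  let largest := |((PySem.List.pyGet? new_list 1).getD 0) - ((PySem.List.pyGet? new_list 0).getD 0)|
  (PySem.List.pyRange 0 ((new_list.length : Int) - 1) 1).foldl
    (fun largest x =>
      let distance := |((PySem.List.pyGet? new_list (x + 1)).getD 0) - ((PySem.List.pyGet? new_list x).getD 0)|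
      if distance > largest then distance else largest)
    largest

-- ===== PORT B =====
def longestdistance_alt (checkpoints : List Int) : Int :=
  let new_list := PySem.List.sorted checkpoints (fun x => x) false
  (PySem.List.max?
    ((PySem.List.pyRange 0 ((new_list.length : Int) - 1) 1).map
      (fun i => (PySem.List.pyGet? new_list (i + 1)).getD 0 - (PySem.List.pyGet? new_list i).getD 0))
    (fun y => y)).getD 0

-- ===== PRECONDITION & SPEC =====
-- Pre_ excludes only lists of length < 2, on which A raises IndexError (new_list[1]).
def Pre_longestdistance (checkpoints : List Int) : Prop := 2 ≤ checkpoints.length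
instance (checkpoints : List Int) : Decidable (Pre_longestdistance checkpoints) := by
  unfold Pre_longestdistance; infer_instance
def pvWitness_longestdistance : List Int := [3, -1, 7]

def Spec_longestdistance (checkpoints : List Int) (out : Int) : Prop := out = longestdistance_alt checkpoints
instance (checkpoints : List Int) (out : Int) : Decidable (Spec_longestdistance checkpoints out) := by unfold Spec_longestdistance; infer_instance

-- ===== CLAIM (what is proved, stated in full; the proofs are below) =====
def Claim_equal_longestdistance : Prop := ∀ (checkpoints : List Int), Dom_longestdistance checkpoints → Pre_longestdistance checkpoints → Spec_longestdistance checkpoints (longestdistance checkpoints)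

-- ===== LEMMAS AND PROOFS =====

theorem pvInnerMin_eq_foldl_min (c : List Int) (i : Int) : pvInnerMin c i = c.foldl min i := by
  induction c generalizing i with
  | nil => rfl
  | cons a t ih =>
    simp only [pvInnerMin, List.foldl_cons] at *
    rw [ih]
    congr 1
    simp only [min_def]
    split_ifs <;> omega

theorem pvInnerMin_cons_isMin (a : Int) (t : List Int) : ∀ y ∈ a :: t, pvInnerMin (a :: t) a ≤ y := by
  have h1 : pvInnerMin (a :: t) a = t.foldl min a := by
    rw [pvInnerMin_eq_foldl_min]; simp
  have h2 := PySem.List.min?_isMin (xs := a :: t) (key := fun y => y) (m := t.foldl min a)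
    (PySem.List.min?_id_cons a t)
  intro y hy
  rw [h1]
  exact h2 y hy

theorem pvInnerMin_cons_mem (a : Int) (t : List Int) : pvInnerMin (a :: t) a ∈ a :: t := by
  rcases pvInnerMin_mem (a :: t) a with h | h
  · rw [h]; exact List.mem_cons_self
  · exact h

theorem pvSelSort_perm_aux : ∀ (n : Nat) (c : List Int), c.length ≤ n → (pvSelSort c).Perm c := by
  intro n
  induction n with
  | zero =>
    intro c hc
    have : c = [] := List.eq_nil_of_length_eq_zero (Nat.le_zero.mp hc)
    subst this; simp [pvSelSort]
  | succ n ih =>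
    intro c hc
    match c with
    | [] => simp [pvSelSort]
    | a :: t =>
      have hm := pvInnerMin_cons_mem a t
      rw [pvSelSort]
      simp only [PySem.List.remove?_eq_some_erase _ _ hm, Option.getD_some]
      have hlen : ((a :: t).erase (pvInnerMin (a :: t) a)).length ≤ n := by
        have := List.length_erase_of_mem hm
        simp only [List.length_cons] at this hc
        omega
      exact (((ih _ hlen).cons _).trans (List.perm_cons_erase hm).symm)

theorem pvSelSort_perm (c : List Int) : (pvSelSort c).Perm c :=
  pvSelSort_perm_aux c.length c le_rfl

theorem pvSelSort_pairwise_aux : ∀ (n : Nat) (c : List Int), c.length ≤ n → (pvSelSort c).Pairwise (· ≤ ·) := by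
  intro n
  induction n with
  | zero =>
    intro c hc
    have : c = [] := List.eq_nil_of_length_eq_zero (Nat.le_zero.mp hc)
    subst this; simp [pvSelSort]
  | succ n ih =>
    intro c hc
    match c with
    | [] => simp [pvSelSort]
    | a :: t =>
      have hm := pvInnerMin_cons_mem a t
      rw [pvSelSort]
      simp only [PySem.List.remove?_eq_some_erase _ _ hm, Option.getD_some]
      have hlen : ((a :: t).erase (pvInnerMin (a :: t) a)).length ≤ n := by
        have := List.length_erase_of_mem hm
        simp only [List.length_cons] at this hc
        omega
      refine List.Pairwise.cons ?_ (ih _ hlen)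
      intro y hy
      have hy' : y ∈ (a :: t).erase (pvInnerMin (a :: t) a) :=
        (pvSelSort_perm _).mem_iff.mp hy
      exact pvInnerMin_cons_isMin a t y (List.mem_of_mem_erase hy')

theorem pvSelSort_pairwise (c : List Int) : (pvSelSort c).Pairwise (· ≤ ·) :=
  pvSelSort_pairwise_aux c.length c le_rfl

theorem pvSelSort_eq_sorted (c : List Int) :
    pvSelSort c = PySem.List.sorted c (fun x => x) false := by
  exact (PySem.List.sorted_id_eq_of_perm_of_pairwise c _ (pvSelSort_perm c) (pvSelSort_pairwise c)).symm

-- ===== VERDICT (by name: the statement is the Claim_ definition above) =====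
theorem longestdistance_spec : Claim_equal_longestdistance := by
  intro c _ hpre
  unfold Pre_longestdistance at hpre
  unfold Spec_longestdistance longestdistance longestdistance_alt
  rw [pvSelSort_eq_sorted]
  set s := PySem.List.sorted c (fun x => x) false with hs
  have hlen : s.length = c.length := by rw [hs]; exact PySem.List.length_sorted c _ _
  have h2 : 2 ≤ s.length := hlen ▸ hpre
  have hmono : ∀ i : Int, 0 ≤ i → i + 1 < (s.length : Int) →
      (PySem.List.pyGet? s i).getD 0 ≤ (PySem.List.pyGet? s (i + 1)).getD 0 := by
    intro i h0 h1
    show PySem.List.pyGetD s i 0 ≤ PySem.List.pyGetD s (i + 1) 0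
    rw [PySem.List.pyGetD_eq_getElem s 0 h0 (by omega),
        PySem.List.pyGetD_eq_getElem s 0 (by omega) h1]
    have hq : (i + 1).toNat < (PySem.List.sorted c (fun x => x) false).length := by
      show (i + 1).toNat < s.length; omega
    have := PySem.List.sorted_id_getElem_mono c
      (p := i.toNat) (q := (i + 1).toNat) (by omega) hq
    exact this
  have hml : (0 : Int) < (s.length : Int) - 1 := by omega
  dsimp only
  rw [PySem.List.pyRange_one_cons hml]
  simp only [List.map_cons, List.foldl_cons, zero_add]
  rw [PySem.List.max?_id_cons, Option.getD_some, List.foldl_map]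
  have habs0 : |(PySem.List.pyGet? s 1).getD 0 - (PySem.List.pyGet? s 0).getD 0|
      = (PySem.List.pyGet? s 1).getD 0 - (PySem.List.pyGet? s 0).getD 0 := by
    have := hmono 0 le_rfl (by omega)
    rw [zero_add] at this
    rw [abs_of_nonneg (by omega)]
  rw [habs0, if_neg (lt_irrefl _)]
  refine PySem.List.foldl_congr_mem _ _ _ _ ?_
  intro acc x hx
  have hxb := PySem.List.mem_pyRange_one.mp hx
  have hd := hmono x (by omega) (by omega)
  simp only [abs_of_nonneg (show (0 : Int) ≤ (PySem.List.pyGet? s (x + 1)).getD 0 - (PySem.List.pyGet? s x).getD 0 by omega)]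
  rw [max_def]
  split_ifs <;> omega
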